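-- pv_equiv track=rewrite | github.com/Aasthaengg/IBMdataset | Python_codes/p03488/s524512312.py | check
-- ===== SOURCE A (Python) =====
-- def check(vec, init_pos, target_pos):
--     dp = {init_pos}
--
--     for nv in vec:
--         if nv == 0:
--             continue
--         dp_next = set()
--         for v in dp:
--             dp_next.add(v - nv)
--             dp_next.add(v + nv)
--         dp = dp_next
--
--     return target_pos in dp
-- ===== SOURCE B (Python) =====
-- def check(vec, init_pos, target_pos):
--     # Reduction to bounded subset-sum: with S = sum of |v| over nonzero v and
--     # d = target - init, the target is reachable iff d and S have equal parity,
--     # |d| <= S, and t = (S - d)//2 is a subset sum of the absolute values.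
--     weights = [abs(v) for v in vec if v != 0]
--     total = sum(weights)
--     d = target_pos - init_pos
--     if (d - total) % 2 != 0 or abs(d) > total:
--         return False
--     t = (total - d) // 2
--     sums = {0}
--     for a in weights:
--         sums |= {s + a for s in sums if s + a <= t}
--     return t in sums
-- ===== Notes on version B (the rewrite author's own statement) =====
-- stated objective: alternative
-- what changed: Replaces A's breadth-first expansion of the set of reachable positions by an arithmetic reduction (parity and bound on d = target-init) to a bounded subset-sum over the absolute values, accumulated one-directionally with pruning at t = (S-d)/2.
import Mathlib
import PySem

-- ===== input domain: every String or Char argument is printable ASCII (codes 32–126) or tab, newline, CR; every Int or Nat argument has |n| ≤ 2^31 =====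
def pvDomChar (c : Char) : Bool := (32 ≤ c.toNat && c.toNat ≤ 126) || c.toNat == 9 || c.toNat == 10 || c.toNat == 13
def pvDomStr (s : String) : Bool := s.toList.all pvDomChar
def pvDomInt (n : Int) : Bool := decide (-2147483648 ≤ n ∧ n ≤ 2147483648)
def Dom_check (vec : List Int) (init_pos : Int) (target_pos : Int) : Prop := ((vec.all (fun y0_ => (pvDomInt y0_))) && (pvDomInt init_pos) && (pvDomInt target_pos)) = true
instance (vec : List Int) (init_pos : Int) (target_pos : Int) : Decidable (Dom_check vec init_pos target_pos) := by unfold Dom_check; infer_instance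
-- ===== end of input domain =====

-- B replaces A's breadth-first set expansion by a parity/bound reduction to a
-- bounded subset-sum over the absolute values, accumulated with pruning; objective:
-- an alternative algorithm of similar cost.

-- ===== PORT A =====
-- literal port: dp = {init_pos}; for nv in vec: skip 0, else rebuild the set from v-nv, v+nv
def check (vec : List Int) (init_pos : Int) (target_pos : Int) : Bool :=
  let dp : PySem.Set Int :=
    vec.foldl (fun dp nv =>
      if nv == 0 then dp
      else dp.foldl (fun s v => PySem.Set.add (PySem.Set.add s (v - nv)) (v + nv))
             PySem.Set.empty)
      (PySem.Set.add PySem.Set.empty init_pos)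
  PySem.Set.contains dp target_pos

-- ===== PORT B =====
-- literal port of Source B; the weights abs(v) are nonnegative Python ints, kept as Nat;
-- t = (total - d) // 2 is nonnegative under the guard, so the .toNat after Python's
-- floordiv is exact wherever sums are consulted; 'sums |= {...}' is folded element-wise.
def check_alt (vec : List Int) (init_pos : Int) (target_pos : Int) : Bool :=
  let weights : List Nat := (vec.filter (fun v => v ≠ 0)).map Int.natAbs
  let total : Nat := weights.sum
  let d : Int := target_pos - init_pos
  if PySem.Int.mod (d - (total : Int)) 2 ≠ 0 ∨ (d.natAbs : Nat) > total then false
  else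
    let t : Nat := (PySem.Int.floordiv ((total : Int) - d) 2).toNat
    let sums : PySem.Set Nat :=
      weights.foldl (fun sums a =>
        sums.foldl (fun acc s => if s + a ≤ t then PySem.Set.add acc (s + a) else acc)
          sums) (PySem.Set.add PySem.Set.empty 0)
    sums.contains t

-- ===== PRECONDITION & SPEC =====
def Spec_check (vec : List Int) (init_pos : Int) (target_pos : Int) (out : Bool) : Prop := out = check_alt vec init_pos target_pos
instance (vec : List Int) (init_pos : Int) (target_pos : Int) (out : Bool) : Decidable (Spec_check vec init_pos target_pos out) := by unfold Spec_check; infer_instance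

-- ===== CLAIM (what is proved, stated in full; the proofs are below) =====
def Claim_equal_check : Prop := ∀ (vec : List Int) (init_pos : Int) (target_pos : Int), Dom_check vec init_pos target_pos → Spec_check vec init_pos target_pos (check vec init_pos target_pos)

-- ===== LEMMAS AND PROOFS =====

-- signed-sum reachability of an offset d using the elements of l (zeros skipped)
def Sig : List Int → Int → Prop
  | [], d => d = 0
  | nv :: l, d => if nv = 0 then Sig l d else (Sig l (d + nv) ∨ Sig l (d - nv))

-- subset-sum predicate over the weights
def SubSum : List Nat → Nat → Prop
  | [], t => t = 0
  | a :: l, t => SubSum l t ∨ (a ≤ t ∧ SubSum l (t - a))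

-- membership in A's inner rebuild loop
theorem mem_inner (nv : Int) (dp : List Int) (acc : PySem.Set Int) (x : Int) :
    x ∈ dp.foldl (fun s v => PySem.Set.add (PySem.Set.add s (v - nv)) (v + nv)) acc ↔
      x ∈ acc ∨ ∃ v ∈ dp, x = v - nv ∨ x = v + nv := by
  induction dp generalizing acc with
  | nil => simp
  | cons v vs ih =>
      simp only [List.foldl, ih, PySem.Set.mem_add]
      constructor
      · rintro (((h | h) | h) | ⟨w, hw, h⟩)
        · exact Or.inl h
        · exact Or.inr ⟨v, by simp, Or.inl h⟩
        · exact Or.inr ⟨v, by simp, Or.inr h⟩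
        · exact Or.inr ⟨w, by simp [hw], h⟩
      · rintro (h | ⟨w, hw, h⟩)
        · exact Or.inl (Or.inl (Or.inl h))
        · rcases List.mem_cons.mp hw with rfl | hw
          · rcases h with h | h
            · exact Or.inl (Or.inl (Or.inr h))
            · exact Or.inl (Or.inr h)
          · exact Or.inr ⟨w, hw, h⟩

-- characterisation of A's outer fold by the signed-sum predicate
theorem mem_foldA :
    ∀ (l : List Int) (dp : List Int) (x : Int),
      (x ∈ l.foldl (fun dp nv =>
          if nv == 0 then dp
          else dp.foldl (fun s v => PySem.Set.add (PySem.Set.add s (v - nv)) (v + nv))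
                 PySem.Set.empty) dp) ↔ ∃ v ∈ dp, Sig l (x - v) := by
  intro l
  induction l with
  | nil =>
      intro dp x
      simp only [List.foldl, Sig]
      constructor
      · intro h; exact ⟨x, h, by ring⟩
      · rintro ⟨v, hv, h⟩
        have hxv : x = v := by omega
        exact hxv ▸ hv
  | cons nv rest ih =>
      intro dp x
      simp only [List.foldl]
      by_cases h0 : nv = 0
      · subst h0
        simp only [beq_self_eq_true, if_true, ih]
        simp [Sig]
      · have hne : (nv == 0) = false := by simp [h0]
        simp only [hne, Bool.false_eq_true, if_false, ih]
        constructor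
        · rintro ⟨w, hw, hsig⟩
          rw [mem_inner] at hw
          rcases hw with habs | ⟨v, hv, rfl | rfl⟩
          · simp [PySem.Set.empty] at habs
          · refine ⟨v, hv, ?_⟩
            simp only [Sig, if_neg h0]
            left
            have heq : x - (v - nv) = x - v + nv := by ring
            rwa [heq] at hsig
          · refine ⟨v, hv, ?_⟩
            simp only [Sig, if_neg h0]
            right
            have heq : x - (v + nv) = x - v - nv := by ring
            rwa [heq] at hsig
        · rintro ⟨v, hv, hsig⟩
          simp only [Sig, if_neg h0] at hsig
          rcases hsig with h | h
          · refine ⟨v - nv, ?_, ?_⟩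
            · rw [mem_inner]; exact Or.inr ⟨v, hv, Or.inl rfl⟩
            · have heq : x - (v - nv) = x - v + nv := by ring
              rwa [heq]
          · refine ⟨v + nv, ?_, ?_⟩
            · rw [mem_inner]; exact Or.inr ⟨v, hv, Or.inr rfl⟩
            · have heq : x - (v + nv) = x - v - nv := by ring
              rwa [heq]

-- a subset sum never exceeds the total
theorem subSum_le_sum : ∀ (l : List Nat) (t : Nat), SubSum l t → t ≤ l.sum := by
  intro l
  induction l with
  | nil => intro t h; simp only [SubSum] at h; simp [h]
  | cons a l ih =>
      intro t h
      rcases h with h | ⟨ha, h⟩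
      · have := ih _ h; simp only [List.sum_cons]; omega
      · have := ih _ h; simp only [List.sum_cons]; omega

-- Sig over the original list equals the subset-sum formulation over the weights
theorem sig_iff_subSum :
    ∀ (l : List Int) (d : Int),
      Sig l d ↔ ∃ t : Nat, SubSum ((l.filter (fun v => v ≠ 0)).map Int.natAbs) t ∧
        d = (((l.filter (fun v => v ≠ 0)).map Int.natAbs).sum : Int) - 2 * t := by
  intro l
  induction l with
  | nil => intro d; simp [Sig, SubSum]
  | cons nv rest ih =>
      intro d
      by_cases h0 : nv = 0
      · subst h0
        simpa [Sig, List.filter] using ih d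
      · have hfil : (nv :: rest).filter (fun v => v ≠ 0) =
          nv :: rest.filter (fun v => v ≠ 0) := by simp [List.filter, h0]
        rw [hfil]
        simp only [Sig, if_neg h0, List.map_cons, List.sum_cons, ih]
        have h0' : nv ≠ 0 := h0
        constructor
        · rintro (⟨t, ht, hd⟩ | ⟨t, ht, hd⟩)
          · rcases lt_or_gt_of_ne h0' with hneg | hpos
            · exact ⟨t, Or.inl ht, by omega⟩
            · exact ⟨t + nv.natAbs, Or.inr ⟨by omega, by simpa using ht⟩, by omega⟩
          · rcases lt_or_gt_of_ne h0' with hneg | hpos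
            · exact ⟨t + nv.natAbs, Or.inr ⟨by omega, by simpa using ht⟩, by omega⟩
            · exact ⟨t, Or.inl ht, by omega⟩
        · rintro ⟨t, ht | ⟨hle, ht⟩, hd⟩
          · rcases lt_or_gt_of_ne h0' with hneg | hpos
            · exact Or.inl ⟨t, ht, by omega⟩
            · exact Or.inr ⟨t, ht, by omega⟩
          · rcases lt_or_gt_of_ne h0' with hneg | hpos
            · exact Or.inr ⟨t - nv.natAbs, ht, by omega⟩
            · exact Or.inl ⟨t - nv.natAbs, ht, by omega⟩

-- SubSum always admits the empty subset
theorem subSum_zero : ∀ (l : List Nat), SubSum l 0 := by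
  intro l; induction l with
  | nil => rfl
  | cons a l ih => exact Or.inl ih

-- membership in B's inner fold (one weight, pruned at t)
theorem mem_innerB (a t : Nat) (sums : List Nat) (acc : PySem.Set Nat) (x : Nat) :
    x ∈ sums.foldl (fun acc s => if s + a ≤ t then PySem.Set.add acc (s + a) else acc) acc ↔
      x ∈ acc ∨ ∃ s ∈ sums, s + a ≤ t ∧ x = s + a := by
  induction sums generalizing acc with
  | nil => simp
  | cons s ss ih =>
      simp only [List.foldl, ih]
      by_cases hle : s + a ≤ t
      · rw [if_pos hle]
        simp only [PySem.Set.mem_add]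
        constructor
        · rintro ((h | h) | ⟨w, hw, hwle, rfl⟩)
          · exact Or.inl h
          · exact Or.inr ⟨s, by simp, hle, h⟩
          · exact Or.inr ⟨w, by simp [hw], hwle, rfl⟩
        · rintro (h | ⟨w, hw, hwle, rfl⟩)
          · exact Or.inl (Or.inl h)
          · rcases List.mem_cons.mp hw with rfl | hw
            · exact Or.inl (Or.inr rfl)
            · exact Or.inr ⟨w, hw, hwle, rfl⟩
      · rw [if_neg hle]
        constructor
        · rintro (h | ⟨w, hw, hwle, rfl⟩)
          · exact Or.inl h
          · exact Or.inr ⟨w, by simp [hw], hwle, rfl⟩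
        · rintro (h | ⟨w, hw, hwle, rfl⟩)
          · exact Or.inl h
          · rcases List.mem_cons.mp hw with rfl | hw
            · exact absurd hwle hle
            · exact Or.inr ⟨w, hw, hwle, rfl⟩

-- invariant of B's outer fold: the pruned subset-sum accumulation (weights positive)
theorem mem_foldB (t : Nat) :
    ∀ (l : List Nat), (∀ a ∈ l, 0 < a) → ∀ (S0 : PySem.Set Nat) (x : Nat),
      (x ∈ l.foldl (fun sums a =>
          sums.foldl (fun acc s => if s + a ≤ t then PySem.Set.add acc (s + a) else acc)
            sums) S0) ↔
        x ∈ S0 ∨ ∃ s ∈ S0, ∃ u : Nat, SubSum l u ∧ 0 < u ∧ x = s + u ∧ x ≤ t := by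
  intro l
  induction l with
  | nil =>
      intro _ S0 x
      simp only [List.foldl, SubSum]
      constructor
      · exact Or.inl
      · rintro (h | ⟨s, hs, u, rfl, hu, rfl, hxt⟩)
        · exact h
        · omega
  | cons a l ih =>
      intro hpos S0 x
      have ha : 0 < a := hpos a (by simp)
      have hpos' : ∀ b ∈ l, 0 < b := fun b hb => hpos b (by simp [hb])
      simp only [List.foldl]
      rw [ih hpos']
      constructor
      · rintro (h1 | ⟨s1, hs1, u', hu', hu'pos, rfl, hxt⟩)
        · rw [mem_innerB] at h1
          rcases h1 with h | ⟨s, hs, hsle, rfl⟩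
          · exact Or.inl h
          · exact Or.inr ⟨s, hs, a, Or.inr ⟨le_refl a, by simpa using subSum_zero l⟩,
              ha, rfl, hsle⟩
        · rw [mem_innerB] at hs1
          rcases hs1 with hs | ⟨s, hs, hsle, rfl⟩
          · exact Or.inr ⟨s1, hs, u', Or.inl hu', hu'pos, rfl, hxt⟩
          · exact Or.inr ⟨s, hs, a + u', Or.inr ⟨by omega, by simpa using hu'⟩,
              by omega, by omega, hxt⟩
      · rintro (h | ⟨s, hs, u, hu | ⟨hau, hu⟩, hupos, rfl, hxt⟩)
        · exact Or.inl (by rw [mem_innerB]; exact Or.inl h)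
        · exact Or.inr ⟨s, by rw [mem_innerB]; exact Or.inl hs, u, hu, hupos, rfl, hxt⟩
        · by_cases hua : u = a
          · subst hua
            refine Or.inl ?_
            rw [mem_innerB]
            exact Or.inr ⟨s, hs, by omega, rfl⟩
          · refine Or.inr ⟨s + a, ?_, u - a, hu, by omega, by omega, hxt⟩
            rw [mem_innerB]
            exact Or.inr ⟨s, hs, by omega, rfl⟩

-- B returns true exactly on the subset-sum characterisation
theorem alt_iff (vec : List Int) (i p : Int) :
    check_alt vec i p = true ↔
      ∃ t : Nat, SubSum ((vec.filter (fun v => v ≠ 0)).map Int.natAbs) t ∧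
        p - i = ((((vec.filter (fun v => v ≠ 0)).map Int.natAbs).sum : Nat) : Int) - 2 * t := by
  simp only [check_alt]
  set W := (vec.filter (fun v => v ≠ 0)).map Int.natAbs with hW
  set S : Nat := W.sum with hS
  set d : Int := p - i with hd
  have hm : PySem.Int.mod (d - (S : Int)) 2 = (d - (S : Int)) % 2 :=
    PySem.Int.mod_eq_emod_of_pos (by norm_num)
  by_cases hbad : PySem.Int.mod (d - (S : Int)) 2 ≠ 0 ∨ (d.natAbs : Nat) > S
  · rw [if_pos hbad]
    rw [hm] at hbad
    constructor
    · intro h; exact absurd h (by simp)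
    · rintro ⟨t, ht, hdt⟩
      have htS := subSum_le_sum W t ht
      rcases hbad with hpar | hbnd
      · exact absurd (by omega : (d - (S : Int)) % 2 = 0) hpar
      · omega
  · rw [if_neg hbad]
    rw [hm, not_or, ne_eq, not_not, not_lt] at hbad
    obtain ⟨hpar, hbnd⟩ := hbad
    have hfl : PySem.Int.floordiv ((S : Int) - d) 2 = ((S : Int) - d) / 2 :=
      PySem.Int.floordiv_eq_ediv_of_pos (by norm_num)
    set t0 : Nat := (PySem.Int.floordiv ((S : Int) - d) 2).toNat with ht0
    have hSd : 0 ≤ (S : Int) - d := by omega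
    have ht0' : ((t0 : Nat) : Int) = ((S : Int) - d) / 2 := by
      rw [ht0, hfl]
      have hnn : 0 ≤ ((S : Int) - d) / 2 := Int.ediv_nonneg hSd (by norm_num)
      omega
    have ht0eq : (S : Int) - 2 * (t0 : Int) = d := by omega
    have hWpos : ∀ a ∈ W, 0 < a := by
      intro a haW
      rw [hW] at haW
      rcases List.mem_map.mp haW with ⟨v, hv, rfl⟩
      have := List.of_mem_filter hv
      simp only [ne_eq, decide_eq_true_eq] at this
      omega
    rw [PySem.Set.contains_iff, mem_foldB t0 W hWpos]
    have h0mem : ∀ y : Nat, y ∈ (PySem.Set.add PySem.Set.empty 0 : PySem.Set Nat) ↔ y = 0 := by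
      intro y; simp [PySem.Set.add, PySem.Set.empty]
    constructor
    · rintro (h | ⟨s, hs, u, hu, hupos, heq, hle⟩)
      · rw [h0mem] at h
        exact ⟨0, subSum_zero W, by omega⟩
      · rw [h0mem] at hs
        subst hs
        exact ⟨t0, by simpa [heq] using hu, by omega⟩
    · rintro ⟨t, ht, hdt⟩
      have htt0 : t = t0 := by omega
      subst htt0
      by_cases h0 : t0 = 0
      · exact Or.inl ((h0mem t0).mpr h0)
      · exact Or.inr ⟨0, (h0mem 0).mpr rfl, t0, ht, by omega, by omega, le_refl t0⟩

-- ===== VERDICT (by name: the statement is the Claim_ definition above) =====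
theorem check_spec : Claim_equal_check := by
  intro vec init_pos target_pos _
  simp only [Spec_check]
  rw [Bool.eq_iff_iff, alt_iff]
  unfold check
  rw [PySem.Set.contains_iff, mem_foldA, ← sig_iff_subSum]
  constructor
  · rintro ⟨v, hv, h⟩
    have hv' : v = init_pos := by
      simpa [PySem.Set.add, PySem.Set.empty] using hv
    exact hv' ▸ h
  · intro h
    refine ⟨init_pos, ?_, h⟩
    simp [PySem.Set.add, PySem.Set.empty]
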